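-- pv_equiv track=rewrite | github.com/UlugbekMuslitdinov/csc110 | hollow.py | hollow_row
-- ===== SOURCE A (Python) =====
-- def hollow_row(char, N):
--     """
--     Takes two arguements. Creates the resultng string 'line' with for loop
--     returns the reulting string
--     """
--     line = ""
--     for i in range(N):
--             if i == 0 or i == N-1:
--                 line += char
--             else:
--                 line += " "
--     return line
-- ===== SOURCE B (Python) =====
-- def hollow_row(char, N):
--     if N <= 0:
--         return ""
--     if N == 1:
--         return char
--     return char + " " * (N - 2) + char
-- ===== Notes on version B (the rewrite author's own statement) =====
-- stated objective: simpler
-- what changed: Replaced the per-index loop with a closed-form concatenation char + ' '*(N-2) + char, with direct returns for N<=0 and N==1.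
import Mathlib
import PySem

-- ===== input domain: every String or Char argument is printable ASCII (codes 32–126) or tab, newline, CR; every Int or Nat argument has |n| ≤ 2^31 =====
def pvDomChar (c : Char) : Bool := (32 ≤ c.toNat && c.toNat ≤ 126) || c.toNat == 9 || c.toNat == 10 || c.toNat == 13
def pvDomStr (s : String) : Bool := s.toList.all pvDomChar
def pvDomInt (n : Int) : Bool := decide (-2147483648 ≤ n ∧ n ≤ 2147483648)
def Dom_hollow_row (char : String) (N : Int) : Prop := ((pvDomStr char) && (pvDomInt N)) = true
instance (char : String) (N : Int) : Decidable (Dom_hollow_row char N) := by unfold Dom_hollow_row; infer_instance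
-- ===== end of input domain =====

-- B replaces A's per-index loop by the closed-form concatenation char ++ " "*(N-2) ++ char (objective: simpler).

-- ===== PORT A =====
def hollow_row (char : String) (N : Int) : String :=
  (PySem.List.pyRange 0 N 1).foldl
    (fun line i => if i == 0 || i == N - 1 then line ++ char else line ++ " ") ""

-- ===== PORT B =====
def hollow_row_alt (char : String) (N : Int) : String :=
  if N ≤ 0 then ""
  else if N = 1 then char
  else char ++ String.ofList (List.replicate (N - 2).toNat ' ') ++ char

-- ===== PRECONDITION & SPEC =====
def Spec_hollow_row (char : String) (N : Int) (out : String) : Prop := out = hollow_row_alt char N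
instance (char : String) (N : Int) (out : String) : Decidable (Spec_hollow_row char N out) := by unfold Spec_hollow_row; infer_instance

-- ===== CLAIM (what is proved, stated in full; the proofs are below) =====
def Claim_equal_hollow_row : Prop := ∀ (char : String) (N : Int), Dom_hollow_row char N → Spec_hollow_row char N (hollow_row char N)

-- ===== LEMMAS AND PROOFS =====

-- The middle of A's loop (indices in [a, b) with 1 ≤ a, b = N-1) only appends spaces.
theorem hollow_mid (char : String) (b : Int) :
    ∀ (n : Nat) (a : Int) (s : String), 1 ≤ a → b - a = (n : Int) →
    (PySem.List.pyRange a b 1).foldl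
      (fun line i => if i == 0 || i == b then line ++ char else line ++ " ") s
    = s ++ String.ofList (List.replicate n ' ') := by
  intro n
  induction n with
  | zero =>
    intro a s ha hba
    rw [PySem.List.pyRange_one_eq_nil (by omega)]
    simp
  | succ n ih =>
    intro a s ha hba
    rw [PySem.List.pyRange_one_cons (by omega)]
    have hc : (a == 0 || a == b) = false := by
      simp only [Bool.or_eq_false_iff, beq_eq_false_iff_ne, ne_eq]
      omega
    rw [List.foldl_cons, hc]
    simp only [Bool.false_eq_true, if_false]
    rw [ih (a + 1) (s ++ " ") (by omega) (by omega)]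
    simp [String.ext_iff, List.replicate_succ]

theorem hollow_row_eq (char : String) (N : Int) :
    hollow_row char N = hollow_row_alt char N := by
  unfold hollow_row hollow_row_alt
  by_cases h0 : N ≤ 0
  · rw [PySem.List.pyRange_one_eq_nil (by omega), if_pos h0]
    rfl
  · by_cases h1 : N = 1
    · subst h1
      rw [PySem.List.pyRange_one_cons (by omega),
          PySem.List.pyRange_one_eq_nil (by omega)]
      simp
    · rw [if_neg h0, if_neg h1]
      have hN : 2 ≤ N := by omega
      rw [PySem.List.pyRange_one_cons (show (0:Int) < N by omega), List.foldl_cons]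
      have hsplit : N = (N - 1) + 1 := by omega
      rw [hsplit, PySem.List.pyRange_one_succ_right (by omega), List.foldl_append]
      rw [show N - 1 + 1 - 1 = N - 1 from by omega, show (0:Int) + 1 = 1 from by norm_num]
      have hfirst : (if (0:Int) == 0 || (0:Int) == N - 1 then "" ++ char else "" ++ " ") = char := by
        simp
      rw [hfirst]
      rw [hollow_mid char (N - 1) (N - 2).toNat 1 char (by omega) (by omega)]
      have hlast : (N - 1 == 0 || N - 1 == N - 1) = true := by
        simp
      simp only [List.foldl_cons, List.foldl_nil, hlast, if_true]
      simp

-- ===== VERDICT (by name: the statement is the Claim_ definition above) =====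
theorem hollow_row_spec : Claim_equal_hollow_row := by
  intro char N _
  exact hollow_row_eq char N
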